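-- pv_equiv track=rewrite | github.com/dlalswo0321/bioinfo-algorithm | chapter_04/bioinfo_4m.py | check_and_remove
-- ===== SOURCE A (Python) =====
-- def check_and_remove(L, dists_to_check):
--     temp_removed = []
--     possible = True
--
--     for d in dists_to_check:
--         if d in L:
--             L.remove(d)
--             temp_removed.append(d)
--         else:
--             possible = False
--             break
--
--     if not possible:
--         for d in temp_removed:
--             L.append(d)
--         L.sort()
--         return False
--
--     return True
-- ===== SOURCE B (Python) =====
-- def check_and_remove(L, dists_to_check):
--     # verify-then-act: count table decides feasibility; mutation of L matches A
--     counts = {}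
--     for x in L:
--         counts[x] = counts.get(x, 0) + 1
--     for d in dists_to_check:
--         if counts.get(d, 0) > 0:
--             counts[d] = counts[d] - 1
--         else:
--             L.sort()
--             return False
--     for d in dists_to_check:
--         L.remove(d)
--     return True
-- ===== Notes on version B (the rewrite author's own statement) =====
-- stated objective: alternative
-- what changed: Replaces A's interleaved remove/backtrack loop with a verify-then-act decomposition: a count table of L is built once and scanned against dists_to_check to decide feasibility, removals (or the failure-path sort) happen only afterwards.
import Mathlib
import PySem

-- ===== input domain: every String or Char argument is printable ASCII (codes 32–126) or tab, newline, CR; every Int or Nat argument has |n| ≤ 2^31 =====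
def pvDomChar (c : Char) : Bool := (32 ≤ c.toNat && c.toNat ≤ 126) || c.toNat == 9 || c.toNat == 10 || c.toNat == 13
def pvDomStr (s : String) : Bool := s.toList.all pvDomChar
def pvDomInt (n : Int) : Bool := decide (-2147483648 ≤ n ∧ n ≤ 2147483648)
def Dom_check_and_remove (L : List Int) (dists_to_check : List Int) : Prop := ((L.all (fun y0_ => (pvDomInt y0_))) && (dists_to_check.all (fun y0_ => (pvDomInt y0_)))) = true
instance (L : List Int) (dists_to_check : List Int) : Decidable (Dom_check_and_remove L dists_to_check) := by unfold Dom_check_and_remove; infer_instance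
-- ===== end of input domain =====

-- B replaces A's interleaved remove/backtrack loop by a verify-then-act count-table scan;
-- equivalence is about the RETURN value only (both Pythons mutate L the same way: removals on
-- success, a sort on failure).

-- ===== PORT A =====
-- A's loop over dists_to_check carrying the mutated L and temp_removed; the failure branch's
-- re-append and sort only affect the mutated list, not the returned Bool.
def check_and_remove_loopA (L : List Int) (temp_removed : List Int) (ds : List Int) : Bool :=
  match ds with
  | [] => true
  | d :: rest =>
      if L.contains d then
        check_and_remove_loopA ((PySem.List.remove? L d).getD L) (temp_removed ++ [d]) rest
      else
        false

def check_and_remove (L : List Int) (dists_to_check : List Int) : Bool :=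
  check_and_remove_loopA L [] dists_to_check

-- ===== PORT B =====
-- first pass of Source B: build the count table of L
def check_and_remove_counts (L : List Int) : PySem.Dict Int Int :=
  L.foldl (fun c x => c.insert x (c.getD x 0 + 1)) PySem.Dict.empty

-- second pass of Source B: scan dists_to_check, decrementing counts; the later removal pass and the
-- failure-path sort mutate L only and do not affect the returned Bool.
def check_and_remove_consume (c : PySem.Dict Int Int) (ds : List Int) : Bool :=
  match ds with
  | [] => true
  | d :: rest =>
      if c.getD d 0 > 0 then
        check_and_remove_consume (c.insert d (c.getD d 0 - 1)) rest
      else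
        false

def check_and_remove_alt (L : List Int) (dists_to_check : List Int) : Bool :=
  check_and_remove_consume (check_and_remove_counts L) dists_to_check

-- ===== PRECONDITION & SPEC =====
def Spec_check_and_remove (L : List Int) (dists_to_check : List Int) (out : Bool) : Prop := out = check_and_remove_alt L dists_to_check
instance (L : List Int) (dists_to_check : List Int) (out : Bool) : Decidable (Spec_check_and_remove L dists_to_check out) := by unfold Spec_check_and_remove; infer_instance

-- ===== CLAIM (what is proved, stated in full; the proofs are below) =====
def Claim_equal_check_and_remove : Prop := ∀ (L : List Int) (dists_to_check : List Int), Dom_check_and_remove L dists_to_check → Spec_check_and_remove L dists_to_check (check_and_remove L dists_to_check)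

-- ===== LEMMAS AND PROOFS =====

-- Core invariant: if the dict holds exactly the multiplicities of L, A's loop and B's scan agree.
theorem loopA_eq_consume (ds : List Int) :
    ∀ (L temp : List Int) (c : PySem.Dict Int Int),
      (∀ x : Int, c.getD x 0 = (L.count x : Int)) →
      check_and_remove_loopA L temp ds = check_and_remove_consume c ds := by
  induction ds with
  | nil => intro L temp c h; rfl
  | cons d rest ih =>
      intro L temp c h
      simp only [check_and_remove_loopA, check_and_remove_consume, h d]
      by_cases hd : d ∈ L
      · have hmem : L.contains d = true := by simpa using hd
        have hcnt : 0 < L.count d := List.count_pos_iff.mpr hd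
        have hpos : (0 : Int) < (L.count d : Int) := by exact_mod_cast hcnt
        rw [hmem, if_pos hpos]
        simp only [if_true, PySem.List.remove?_eq_some_erase (v := d) (xs := L) hd, Option.getD_some]
        apply ih
        intro x
        rw [PySem.Dict.getD_insert, h x, List.count_erase]
        by_cases hx : x = d
        · subst hx
          simp only [beq_self_eq_true, if_pos]
          omega
        · have : (d == x) = false := by simpa using (Ne.symm hx)
          simp [hx, this]
      · have hmem : L.contains d = false := by simpa using hd
        have hcnt : L.count d = 0 := by simpa using List.count_eq_zero.mpr hd
        rw [hmem, hcnt]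
        simp
-- ===== VERDICT (by name: the statement is the Claim_ definition above) =====
theorem check_and_remove_spec : Claim_equal_check_and_remove := by
  intro L dists_to_check _
  unfold Spec_check_and_remove check_and_remove check_and_remove_alt
  apply loopA_eq_consume
  intro x
  unfold check_and_remove_counts
  rw [PySem.Dict.getD_foldl_insert_add_one]
  simp
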